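-- pv_equiv track=rewrite | github.com/enesbayri/CanliDovizKurlari-EXE-PYTHON | CanliDoviz.py | sekilBul
-- ===== SOURCE A (Python) =====
-- def sekilBul(a):
--         sayac=0
--         sekil=False
--         for i in a:
--             if i=="%":
--                 sayac+=1
--             if sayac==1 and i=="-":
--                 sekil=False
--                 break
--             else:
--                 sekil=True
--
--         return sekil
-- ===== SOURCE B (Python) =====
-- def sekilBul(a):
--     if not a:
--         return False
--     first = a.find('%')
--     if first == -1:
--         return True
--     second = a.find('%', first + 1)
--     segment = a[first:second] if second != -1 else a[first:]
--     return '-' not in segment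
-- ===== Notes on version B (the rewrite author's own statement) =====
-- stated objective: faster
-- what changed: Replaces the stateful per-character counting loop (percent counter + flag + early break) with a direct computation: locate the first and second percent signs with str.find, slice out the region between them, and test hyphen membership with the in operator.
import Mathlib
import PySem

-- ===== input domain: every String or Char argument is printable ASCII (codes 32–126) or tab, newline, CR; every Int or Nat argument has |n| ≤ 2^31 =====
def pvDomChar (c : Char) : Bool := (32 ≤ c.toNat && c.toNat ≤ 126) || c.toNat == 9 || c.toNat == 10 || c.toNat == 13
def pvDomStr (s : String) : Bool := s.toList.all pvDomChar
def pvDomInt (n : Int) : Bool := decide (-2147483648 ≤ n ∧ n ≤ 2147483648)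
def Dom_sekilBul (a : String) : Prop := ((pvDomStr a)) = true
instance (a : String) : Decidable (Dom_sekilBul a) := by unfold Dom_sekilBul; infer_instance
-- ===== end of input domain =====

-- B replaces A's per-character counting loop (counter + flag + break) by find/slice/membership (C-level builtins); a timing run measured B faster.

-- ===== PORT A =====
-- A's for-loop: state (sayac, sekil); the break returns False immediately.
def sekilBulLoop : List Char → Int → Bool → Bool
  | [], _, sekil => sekil
  | c :: cs, sayac, _ =>
    let sayac' := if c = '%' then sayac + 1 else sayac
    if sayac' = 1 ∧ c = '-' then false
    else sekilBulLoop cs sayac' true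

def sekilBul (a : String) : Bool := sekilBulLoop a.toList 0 false

-- ===== PORT B =====
def sekilBul_alt (a : String) : Bool :=
  if a.toList.isEmpty then false
  else
    let first := PySem.Str.find a "%"
    if first = -1 then true
    else
      let second := PySem.Str.findFrom a "%" (first + 1) none
      let segment := if second ≠ -1 then PySem.Str.slice a (some first) (some second)
                     else PySem.Str.slice a (some first) none
      !(PySem.Str.isIn "-" segment)

-- ===== PRECONDITION & SPEC =====
def Spec_sekilBul (a : String) (out : Bool) : Prop := out = sekilBul_alt a
instance (a : String) (out : Bool) : Decidable (Spec_sekilBul a out) := by unfold Spec_sekilBul; infer_instance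

-- ===== CLAIM (what is proved, stated in full; the proofs are below) =====
def Claim_equal_sekilBul : Prop := ∀ (a : String), Dom_sekilBul a → Spec_sekilBul a (sekilBul a)

-- ===== LEMMAS AND PROOFS =====

-- once the counter is ≥ 2 the loop can never break again
lemma loop_ge_two (cs : List Char) : ∀ s : Int, 2 ≤ s → sekilBulLoop cs s true = true := by
  induction cs with
  | nil => intro s h; rfl
  | cons c cs ih =>
    intro s h
    by_cases hc : c = '%'
    · subst hc
      simp only [sekilBulLoop]
      norm_num
      exact ⟨Or.inl (by omega), ih _ (by omega)⟩
    · simp only [sekilBulLoop, if_neg hc]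
      rw [if_neg (by rintro ⟨h1, _⟩; omega)]
      exact ih _ h

-- with counter 1, the loop breaks iff '-' occurs before the next '%'
lemma loop_one (v : List Char) :
    sekilBulLoop v 1 true = !((v.takeWhile (· ≠ '%')).contains '-') := by
  induction v with
  | nil => rfl
  | cons c cs ih =>
    by_cases hc : c = '%'
    · subst hc
      simp only [sekilBulLoop]
      norm_num
      exact loop_ge_two cs 2 (by omega)
    · by_cases hd : c = '-'
      · subst hd
        simp [sekilBulLoop, hc]
      · simp only [sekilBulLoop, if_neg hc]
        rw [if_neg (by rintro ⟨_, h2⟩; exact hd h2)]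
        rw [ih]
        simp only [List.takeWhile_cons]
        simp [hc]
        intro _ h
        exact hd h.symm

-- counter 0: chars before the first '%' never break the loop
lemma loop_zero (u : List Char) : ∀ (rest : List Char) (b : Bool), '%' ∉ u →
    sekilBulLoop (u ++ rest) 0 b = sekilBulLoop rest 0 (if u.isEmpty then b else true) := by
  induction u with
  | nil => intro rest b _; simp
  | cons c cs ih =>
    intro rest b hu
    have hc : c ≠ '%' := fun h => hu (h ▸ List.mem_cons_self)
    simp only [List.cons_append, sekilBulLoop, if_neg hc]
    rw [if_neg (by rintro ⟨h1, _⟩; omega)]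
    rw [ih rest true (fun h => hu (List.mem_cons_of_mem _ h))]
    simp

-- first-occurrence split of a member
lemma exists_first_split {c : Char} {l : List Char} (h : c ∈ l) :
    ∃ u v, l = u ++ c :: v ∧ c ∉ u := by
  induction l with
  | nil => cases h
  | cons x xs ih =>
    by_cases hx : x = c
    · exact ⟨[], xs, by simp [hx], by simp⟩
    · have h' : c ∈ xs := by
        rcases List.mem_cons.1 h with h | h
        · exact absurd h (fun hh => hx hh.symm)
        · exact h
      rcases ih h' with ⟨u, v, rfl, hu⟩
      refine ⟨x :: u, v, by simp, ?_⟩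
      intro hmem
      rcases List.mem_cons.1 hmem with h | h
      · exact hx h.symm
      · exact hu h

lemma takeWhile_first {c : Char} (w v : List Char) (hw : c ∉ w) :
    (w ++ c :: v).takeWhile (· ≠ c) = w := by
  induction w with
  | nil => rw [List.nil_append, List.takeWhile_cons, if_neg (by simp)]
  | cons x xs ih =>
    have hx : x ≠ c := fun h => hw (h ▸ List.mem_cons_self)
    rw [List.cons_append, List.takeWhile_cons, if_pos (by simp [hx])]
    exact congrArg (x :: ·) (ih (fun h => hw (List.mem_cons_of_mem _ h)))

-- Python's find on a singleton pattern finds the first occurrence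
lemma find_singleton {c : Char} (u v : List Char) (hu : c ∉ u) :
    PySem.Chars.find (u ++ c :: v) [c] = (u.length : Int) := by
  have hmem : [c] <:+: (u ++ c :: v) := (List.singleton_infix_iff c _).2 (by simp)
  have hk : 0 ≤ PySem.Chars.find (u ++ c :: v) [c] :=
    (PySem.Chars.find_nonneg_iff _ _).2 hmem
  obtain ⟨hpre, hmin⟩ := PySem.Chars.find_spec hk
  set k := PySem.Chars.find (u ++ c :: v) [c] with hkdef
  have hnotlt : ¬ k.toNat < u.length := by
    intro hlt
    have hh : ((u ++ c :: v).drop k.toNat).head? = some c := by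
      rcases hpre with ⟨t, ht⟩
      rw [← ht]; rfl
    have hget : (u ++ c :: v)[k.toNat]? = some c := by
      rwa [← List.head?_drop]
    have : u[k.toNat]? = some c := by
      rwa [List.getElem?_append_left hlt] at hget
    exact hu (List.mem_of_getElem? this)
  have hnotgt : ¬ u.length < k.toNat := by
    intro hlt
    exact hmin u.length hlt ⟨v, by simp⟩
  omega

lemma find_singleton_none {c : Char} (l : List Char) (h : c ∉ l) :
    PySem.Chars.find l [c] = -1 := by
  rw [PySem.Chars.find_eq_neg_one_iff, List.singleton_infix_iff]
  exact h

-- '- in s' on a singleton pattern is list membership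
lemma isIn_singleton (c : Char) (l : List Char) : PySem.Chars.isIn [c] l = l.contains c := by
  by_cases h : c ∈ l
  · rw [(PySem.Chars.isIn_iff_infix _ _).2 ((List.singleton_infix_iff _ _).2 h)]
    simp [h]
  · rw [(PySem.Chars.isIn_eq_false_iff _ _).2 (fun hi => h ((List.singleton_infix_iff _ _).1 hi))]
    simp [h]

-- ===== VERDICT (by name: the statement is the Claim_ definition above) =====
theorem sekilBul_spec : Claim_equal_sekilBul := by
  intro a _
  unfold Spec_sekilBul sekilBul sekilBul_alt
  by_cases hnil : a.toList = []
  · simp [hnil, sekilBulLoop]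
  · rw [if_neg (by simp [hnil])]
    by_cases hp : '%' ∈ a.toList
    · obtain ⟨u, v, hl, hu⟩ := exists_first_split hp
      have hfind : PySem.Str.find a "%" = (u.length : Int) := by
        rw [PySem.Str.find_eq, show ("%".toList : List Char) = ['%'] from rfl, hl]
        exact find_singleton u v hu
      rw [hfind, if_neg (by omega)]
      -- A side
      have hA : sekilBulLoop a.toList 0 false = !((v.takeWhile (· ≠ '%')).contains '-') := by
        rw [hl, loop_zero u ('%' :: v) false hu]
        have hstep : sekilBulLoop ('%' :: v) 0 (if u.isEmpty then false else true) =
            sekilBulLoop v 1 true := by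
          simp only [sekilBulLoop]
          rw [if_neg (by rintro ⟨_, h2⟩; exact absurd h2 (by decide))]
          norm_num
        rw [hstep, loop_one]
      rw [hA]
      -- B side: the second find
      have hlen : a.toList.length = u.length + 1 + v.length := by
        rw [hl, List.length_append, List.length_cons]; omega
      have hstart : u.length + 1 ≤ a.toList.length := by omega
      have hdrop : a.toList.drop (u.length + 1) = v := by
        rw [hl]
        simp
      have hsecond : PySem.Str.findFrom a "%" ((u.length : Int) + 1) none =
          (if PySem.Chars.find v ['%'] = -1 then -1
           else (u.length : Int) + 1 + PySem.Chars.find v ['%']) := by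
        rw [PySem.Str.findFrom_eq,
            show ((u.length : Int) + 1) = (((u.length + 1 : Nat) : Int)) by push_cast; ring,
            PySem.Chars.findFrom_natCast _ _ _ hstart, hdrop,
            show ("%".toList : List Char) = ['%'] from rfl]
      by_cases hpv : '%' ∈ v
      · -- a second '%' exists: the segment is '%' followed by the chars up to it
        obtain ⟨w, v', hv, hw⟩ := exists_first_split hpv
        have hfv : PySem.Chars.find v ['%'] = (w.length : Int) := by
          rw [hv]; exact find_singleton w v' hw
        rw [hsecond, hfv, if_neg (show ¬((w.length : Int) = -1) by omega)]
        have hne2 : ((u.length : Int) + 1 + (w.length : Int)) ≠ -1 := by omega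
        simp only [ne_eq, hne2, not_false_eq_true, if_true]
        have hseg : (PySem.Str.slice a (some (u.length : Int))
            (some ((u.length : Int) + 1 + (w.length : Int)))).toList = '%' :: w := by
          rw [PySem.Str.toList_slice, PySem.Chars.slice_eq_listSlice,
              show ((u.length : Int) + 1 + (w.length : Int)) =
                ((u.length : Int) + ((w.length + 1 : Nat) : Int)) by push_cast; ring,
              PySem.List.slice_natCast_add, hl,
              List.drop_append_of_le_length (by omega)]
          simp only [List.drop_length, List.nil_append]
          rw [hv, List.take_succ_cons, List.take_left]
        rw [PySem.Str.isIn_eq, hseg, show ("-".toList : List Char) = ['-'] from rfl,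
            isIn_singleton, hv, takeWhile_first w v' hw]
        simp
      · -- no second '%': the segment runs to the end of the string
        have hfv : PySem.Chars.find v ['%'] = -1 := find_singleton_none v hpv
        rw [hsecond, hfv, if_pos rfl]
        simp only [ne_eq, not_true_eq_false, if_false]
        have hseg : (PySem.Str.slice a (some (u.length : Int)) none).toList = '%' :: v := by
          rw [PySem.Str.toList_slice, PySem.Chars.slice_eq_listSlice,
              PySem.List.slice_from_natCast, hl,
              List.drop_append_of_le_length (by omega)]
          simp
        rw [PySem.Str.isIn_eq, hseg, show ("-".toList : List Char) = ['-'] from rfl,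
            isIn_singleton]
        have hAside : v.takeWhile (· ≠ '%') = v := by
          rw [List.takeWhile_eq_self_iff]
          intro x hx
          simp only [ne_eq, decide_not, Bool.not_eq_eq_eq_not, Bool.not_true, decide_eq_false_iff_not]
          exact fun h => hpv (h ▸ hx)
        rw [hAside]
        simp
    · -- no '%' at all: A's loop runs through, B returns True
      have hfind : PySem.Str.find a "%" = -1 := by
        rw [PySem.Str.find_eq]
        exact find_singleton_none _ (by simpa using hp)
      rw [hfind, if_pos rfl]
      rw [show a.toList = a.toList ++ [] by simp,
          loop_zero a.toList [] false (by simpa using hp)]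
      simp [hnil, sekilBulLoop]
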